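-- pv_equiv track=rewrite | github.com/Miloloki/jeu_pendu | pendu_fonction.py | affiche_lettres_trouvees
-- ===== SOURCE A (Python) =====
-- def affiche_lettres_trouvees(positions, mot_a_trouver):
-- 		mot_a_afficher = ''
--
-- 		position_actuelle = 0											#"""On part de 0 position initiale"""
-- 		for lettre_mot in mot_a_trouver:  								#"""on parcours le mot"""
-- 			if position_actuelle in positions:							#"""est-ce que la positino du mot correspond au mot"""
-- 				mot_a_afficher+=lettre_mot 								#"""Si oui on affiche la lettre"""
-- 			else:
-- 				mot_a_afficher+='_'										#"""Si non on affiche un tiret"""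
-- 			position_actuelle+=1
--
-- 		return mot_a_afficher
-- ===== SOURCE B (Python) =====
-- def affiche_lettres_trouvees(positions, mot_a_trouver):
--     buf = ['_'] * len(mot_a_trouver)
--     for p in positions:
--         if 0 <= p < len(mot_a_trouver):
--             buf[p] = mot_a_trouver[p]
--     return ''.join(buf)
-- ===== Notes on version B (the rewrite author's own statement) =====
-- stated objective: alternative
-- what changed: Instead of scanning every character of the word and testing 'position_actuelle in positions' per character, B fills a buffer of underscores and scatters the revealed letters by indexing with each in-range position.
import Mathlib
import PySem

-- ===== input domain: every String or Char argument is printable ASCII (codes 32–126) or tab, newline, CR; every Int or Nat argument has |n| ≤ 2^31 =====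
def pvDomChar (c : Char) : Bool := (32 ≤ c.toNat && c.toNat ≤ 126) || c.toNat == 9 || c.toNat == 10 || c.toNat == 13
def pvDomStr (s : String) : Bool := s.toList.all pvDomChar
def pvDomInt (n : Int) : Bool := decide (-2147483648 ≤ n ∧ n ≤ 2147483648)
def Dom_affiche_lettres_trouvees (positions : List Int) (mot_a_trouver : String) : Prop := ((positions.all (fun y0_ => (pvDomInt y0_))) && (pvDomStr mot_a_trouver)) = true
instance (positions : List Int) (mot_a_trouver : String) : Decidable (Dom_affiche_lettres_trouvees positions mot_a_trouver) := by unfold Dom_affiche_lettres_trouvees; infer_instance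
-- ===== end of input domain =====

-- B scatters revealed letters into a pre-filled underscore buffer instead of scanning the word and testing membership per character (objective: alternative).


-- ===== PORT A =====
-- mot_a_afficher accumulated as a String, position counter as Int, loop over the word's chars
def pvGoA (positions : List Int) (chars : List Char) (pos : Int) (acc : String) : String :=
  match chars with
  | [] => acc
  | c :: rest =>
      pvGoA positions rest (pos + 1) (acc.push (if pos ∈ positions then c else '_'))

def affiche_lettres_trouvees (positions : List Int) (mot_a_trouver : String) : String :=
  pvGoA positions mot_a_trouver.toList 0 ""

-- ===== PORT B =====
-- B: buffer of '_' of the word's length; scatter mot[p] at each in-range position; join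
def affiche_lettres_trouvees_alt (positions : List Int) (mot_a_trouver : String) : String :=
  let n := mot_a_trouver.toList.length
  let buf := List.replicate n '_'
  let buf := positions.foldl (fun b p =>
    if 0 ≤ p ∧ p < (n : Int) then b.set p.toNat (mot_a_trouver.toList.getD p.toNat '_') else b) buf
  String.ofList buf

-- ===== PRECONDITION & SPEC =====
def Spec_affiche_lettres_trouvees (positions : List Int) (mot_a_trouver : String) (out : String) : Prop := out = affiche_lettres_trouvees_alt positions mot_a_trouver
instance (positions : List Int) (mot_a_trouver : String) (out : String) : Decidable (Spec_affiche_lettres_trouvees positions mot_a_trouver out) := by unfold Spec_affiche_lettres_trouvees; infer_instance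

-- ===== CLAIM (what is proved, stated in full; the proofs are below) =====
def Claim_equal_affiche_lettres_trouvees : Prop := ∀ (positions : List Int) (mot_a_trouver : String), Dom_affiche_lettres_trouvees positions mot_a_trouver → Spec_affiche_lettres_trouvees positions mot_a_trouver (affiche_lettres_trouvees positions mot_a_trouver)

-- ===== LEMMAS AND PROOFS =====

-- ===== VERDICT (by name: the statement is the Claim_ definition above) =====
-- the masked word as a plain list of chars
def pvMask (positions : List Int) (chars : List Char) (pos : Int) : List Char :=
  match chars with
  | [] => []
  | c :: rest => (if pos ∈ positions then c else '_') :: pvMask positions rest (pos + 1)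

theorem pvMask_length (positions : List Int) (chars : List Char) (pos : Int) :
    (pvMask positions chars pos).length = chars.length := by
  induction chars generalizing pos with
  | nil => rfl
  | cons c rest ih => simp [pvMask, ih]

theorem pvMask_getD (positions : List Int) (chars : List Char) (pos : Int) (i : Nat)
    (hi : i < chars.length) :
    (pvMask positions chars pos).getD i '_' =
      if (pos + (i : Int)) ∈ positions then chars.getD i '_' else '_' := by
  induction chars generalizing pos i with
  | nil => simp at hi
  | cons c rest ih =>
    cases i with
    | zero => simp [pvMask]
    | succ j =>
      have hj : j < rest.length := by simpa using hi
      have := ih (pos + 1) j hj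
      simp only [pvMask, List.getD_cons_succ]
      rw [this]
      have : pos + 1 + (j : Int) = pos + ((j : Int) + 1) := by ring
      simp [this]

theorem pvGoA_toList (positions : List Int) (chars : List Char) (pos : Int) (acc : String) :
    (pvGoA positions chars pos acc).toList = acc.toList ++ pvMask positions chars pos := by
  induction chars generalizing pos acc with
  | nil => simp [pvGoA, pvMask]
  | cons c rest ih =>
    simp [pvGoA, pvMask, ih, String.toList_push]

theorem pvScatter_length (f : List Char → Int → List Char)
    (hf : ∀ b p, (f b p).length = b.length) (ps : List Int) (b : List Char) :
    (ps.foldl f b).length = b.length := by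
  induction ps generalizing b with
  | nil => rfl
  | cons p ps ih => simp [List.foldl, ih, hf]

theorem pvScatter_getD (s : String) (ps : List Int) (b : List Char) (i : Nat)
    (hb : b.length = s.toList.length) (hi : i < s.toList.length) :
    (ps.foldl (fun b p =>
        if 0 ≤ p ∧ p < (s.toList.length : Int) then
          b.set p.toNat (s.toList.getD p.toNat '_') else b) b).getD i '_' =
      if (i : Int) ∈ ps then s.toList.getD i '_' else b.getD i '_' := by
  induction ps generalizing b with
  | nil => simp
  | cons p ps ih =>
    simp only [List.foldl_cons]
    have hlen : (if 0 ≤ p ∧ p < (s.toList.length : Int) then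
        b.set p.toNat (s.toList.getD p.toNat '_') else b).length = s.toList.length := by
      split <;> simp [hb]
    rw [ih _ hlen]
    by_cases hmem : (i : Int) ∈ ps
    · simp [hmem]
    · by_cases hpi : (i : Int) = p
      · have hc : 0 ≤ p ∧ p < (s.toList.length : Int) := by constructor <;> omega
        have hpt : p.toNat = i := by omega
        have hm2 : ((i : Int) ∈ p :: ps) := by simp [← hpi]
        rw [if_neg hmem, if_pos hc, hpt, if_pos hm2, List.getD_eq_getElem?_getD,
          List.getElem?_set_self (by omega), Option.getD_some]
      · have hnot : ¬ ((i : Int) ∈ p :: ps) := by simp [hmem, hpi]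
        rw [if_neg hmem, if_neg hnot]
        split
        · rw [List.getD_eq_getElem?_getD, List.getElem?_set_ne (by omega),
            ← List.getD_eq_getElem?_getD]
        · rfl

-- ===== VERDICT (by name: the statement is the Claim_ definition above) =====
theorem affiche_lettres_trouvees_spec : Claim_equal_affiche_lettres_trouvees := by
  unfold Claim_equal_affiche_lettres_trouvees
  intro positions s _
  unfold Spec_affiche_lettres_trouvees affiche_lettres_trouvees affiche_lettres_trouvees_alt
  have hlist : pvMask positions s.toList 0 =
      positions.foldl (fun b p => if 0 ≤ p ∧ p < ((s.toList.length : Int)) then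
        b.set p.toNat (s.toList.getD p.toNat '_') else b)
        (List.replicate s.toList.length '_') := by
    apply List.ext_getElem
    · rw [pvMask_length, pvScatter_length _ (by intro b p; split <;> simp)]
      simp
    · intro i h1 h2
      have hi : i < s.toList.length := by rw [pvMask_length] at h1; exact h1
      have e1 : (pvMask positions s.toList 0)[i] =
          (pvMask positions s.toList 0).getD i '_' := by
        rw [List.getD_eq_getElem?_getD, List.getElem?_eq_getElem h1]; rfl
      have e2 : (positions.foldl (fun b p => if 0 ≤ p ∧ p < ((s.toList.length : Int)) then
            b.set p.toNat (s.toList.getD p.toNat '_') else b)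
            (List.replicate s.toList.length '_'))[i] =
          (positions.foldl (fun b p => if 0 ≤ p ∧ p < ((s.toList.length : Int)) then
            b.set p.toNat (s.toList.getD p.toNat '_') else b)
            (List.replicate s.toList.length '_')).getD i '_' := by
        rw [List.getD_eq_getElem?_getD, List.getElem?_eq_getElem h2]; rfl
      rw [e1, e2, pvMask_getD _ _ _ _ hi,
        pvScatter_getD s positions _ i (by simp) hi]
      simp
  have hA := pvGoA_toList positions s.toList 0 ""
  rw [hlist] at hA
  calc pvGoA positions s.toList 0 ""
      = String.ofList (pvGoA positions s.toList 0 "").toList := String.ofList_toList.symm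
    _ = _ := by rw [hA]; simp
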